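-- pv_equiv track=rewrite | github.com/milandre/pearl-challenge-exercise | app/main.py | get_best_fit_score
-- ===== SOURCE A (Python) =====
-- def get_best_fit_score(
--     fit_score, best_fit_scores, home_buyer_number
-- ) -> tuple[int, list[tuple[int, int]]]:
--     """
--     Return the best fit score and updated list of best fit scores after removing
--     the score corresponding to a specific home buyer number if it exists.
--
--     Parameters:
--     fit_score (int): The fit score to be returned.
--     best_fit_scores (list[tuple[int, int]]): A list of tuples containing fit scores and home buyer numbers.
--     home_buyer_number (int): The home buyer number to check and remove from the list if present.
--
--     Returns:
--     tuple[int, list[tuple[int, int]]]: A tuple containing the best fit score and the updated list of best fit scores.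
--     """
--     if len(best_fit_scores) > 0 and home_buyer_number in [
--         elem[1] for elem in best_fit_scores
--     ]:
--         fit_score, _ = [
--             elem for elem in best_fit_scores if home_buyer_number == elem[1]
--         ][0]
--         best_fit_scores.remove((fit_score, home_buyer_number))
--     return fit_score, best_fit_scores
-- ===== SOURCE B (Python) =====
-- def get_best_fit_score(fit_score, best_fit_scores, home_buyer_number):
--     # Single find-and-delete pass instead of three scans; mutates the list in place like A.
--     for i, (fs, hbn) in enumerate(best_fit_scores):
--         if hbn == home_buyer_number:
--             fit_score = fs
--             del best_fit_scores[i]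
--             break
--     return fit_score, best_fit_scores
-- ===== Notes on version B (the rewrite author's own statement) =====
-- stated objective: simpler
-- what changed: Replaces A's three scans (membership comprehension, filter comprehension with [0], and list.remove) by one enumerate loop that finds the first matching home buyer number, records its score, deletes it at that index and breaks.
import Mathlib
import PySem

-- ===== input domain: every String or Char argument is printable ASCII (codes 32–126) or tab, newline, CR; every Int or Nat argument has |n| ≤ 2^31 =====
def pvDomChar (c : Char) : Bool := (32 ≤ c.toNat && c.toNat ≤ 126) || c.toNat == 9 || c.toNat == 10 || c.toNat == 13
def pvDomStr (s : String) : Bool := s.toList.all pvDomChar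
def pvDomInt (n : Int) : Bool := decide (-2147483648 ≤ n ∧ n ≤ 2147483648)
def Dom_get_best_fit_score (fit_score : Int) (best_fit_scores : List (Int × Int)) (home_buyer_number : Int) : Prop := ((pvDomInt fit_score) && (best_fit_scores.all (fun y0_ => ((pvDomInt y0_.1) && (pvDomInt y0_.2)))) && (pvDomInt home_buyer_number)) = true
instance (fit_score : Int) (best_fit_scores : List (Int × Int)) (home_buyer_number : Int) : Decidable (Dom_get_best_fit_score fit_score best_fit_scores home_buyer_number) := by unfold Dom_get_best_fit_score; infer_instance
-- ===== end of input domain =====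

-- B replaces A's three scans by one find-and-delete pass; return-value equivalence only
-- (both Pythons mutate the passed-in list in place the same way).

-- ===== PORT A =====
-- A: guard (nonempty ∧ membership scan), then a filter comprehension indexed at [0],
-- then list.remove of the tuple. The [0] and the remove are guaranteed to succeed by the
-- guard; the `getD` defaults only make those unreachable points total.
def get_best_fit_score (fit_score : Int) (best_fit_scores : List (Int × Int)) (home_buyer_number : Int) : Int × (List (Int × Int)) :=
  if best_fit_scores.length > 0 ∧ home_buyer_number ∈ best_fit_scores.map (fun elem => elem.2) then
    let matched := best_fit_scores.filter (fun elem => home_buyer_number == elem.2)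
    let fit_score' := ((PySem.List.pyGet? matched 0).getD (0, 0)).1
    let best' := (PySem.List.remove? best_fit_scores (fit_score', home_buyer_number)).getD best_fit_scores
    (fit_score', best')
  else
    (fit_score, best_fit_scores)

-- ===== PORT B =====
-- B's loop: walk the list once; on the first element whose second component matched,
-- return its score and the list with that element deleted.
def pvFindDelete (home_buyer_number : Int) : List (Int × Int) → Option (Int × List (Int × Int))
  | [] => none
  | (fs, hbn) :: rest =>
      if hbn == home_buyer_number then some (fs, rest)
      else match pvFindDelete home_buyer_number rest with
           | some (f, r) => some (f, (fs, hbn) :: r)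
           | none => none

def get_best_fit_score_alt (fit_score : Int) (best_fit_scores : List (Int × Int)) (home_buyer_number : Int) : Int × (List (Int × Int)) :=
  match pvFindDelete home_buyer_number best_fit_scores with
  | some (f, r) => (f, r)
  | none => (fit_score, best_fit_scores)

-- ===== PRECONDITION & SPEC =====
def Spec_get_best_fit_score (fit_score : Int) (best_fit_scores : List (Int × Int)) (home_buyer_number : Int) (out : Int × (List (Int × Int))) : Prop := out = get_best_fit_score_alt fit_score best_fit_scores home_buyer_number
instance (fit_score : Int) (best_fit_scores : List (Int × Int)) (home_buyer_number : Int) (out : Int × (List (Int × Int))) : Decidable (Spec_get_best_fit_score fit_score best_fit_scores home_buyer_number out) := by unfold Spec_get_best_fit_score; infer_instance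

-- ===== CLAIM (what is proved, stated in full; the proofs are below) =====
def Claim_equal_get_best_fit_score : Prop := ∀ (fit_score : Int) (best_fit_scores : List (Int × Int)) (home_buyer_number : Int), Dom_get_best_fit_score fit_score best_fit_scores home_buyer_number → Spec_get_best_fit_score fit_score best_fit_scores home_buyer_number (get_best_fit_score fit_score best_fit_scores home_buyer_number)

-- ===== LEMMAS AND PROOFS =====

theorem pvFind_none_iff : ∀ (l : List (Int × Int)) (hbn : Int),
    pvFindDelete hbn l = none ↔ hbn ∉ l.map (fun elem => elem.2) := by
  intro l hbn
  induction l with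
  | nil => simp [pvFindDelete]
  | cons q s ihs =>
    obtain ⟨qa, qb⟩ := q
    by_cases hq : qb = hbn
    · subst hq; simp [pvFindDelete]
    · simp only [pvFindDelete, show (qb == hbn) = false by simp [hq], Bool.false_eq_true,
        if_false, List.map_cons, List.mem_cons]
      cases hgo : pvFindDelete hbn s with
      | none => simp [Ne.symm hq, (ihs).mp hgo]
      | some v =>
        obtain ⟨f, r⟩ := v
        simp only [reduceCtorEq, false_iff, not_not]
        have : hbn ∈ s.map (fun elem => elem.2) := by
          by_contra hnm
          rw [← ihs] at hnm
          rw [hnm] at hgo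
          cases hgo
        exact Or.inr this

theorem pvFind_some_mem : ∀ (l : List (Int × Int)) (hbn f : Int) (r : List (Int × Int)),
    pvFindDelete hbn l = some (f, r) → (f, hbn) ∈ l := by
  intro l
  induction l with
  | nil => intro hbn f r h; simp [pvFindDelete] at h
  | cons q s ihs =>
    obtain ⟨qa, qb⟩ := q
    intro hbn f r h
    by_cases hq : qb = hbn
    · subst hq
      simp only [pvFindDelete, BEq.rfl, if_true, Option.some.injEq, Prod.mk.injEq] at h
      simp [h.1]
    · simp only [pvFindDelete, show (qb == hbn) = false by simp [hq], Bool.false_eq_true,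
        if_false] at h
      cases hgo : pvFindDelete hbn s with
      | none => rw [hgo] at h; simp at h
      | some v =>
        obtain ⟨f', r'⟩ := v
        rw [hgo] at h
        simp only [Option.some.injEq, Prod.mk.injEq] at h
        exact List.mem_cons_of_mem _ (h.1 ▸ ihs hbn f' r' hgo)

theorem pv_main : ∀ (l : List (Int × Int)) (fs hbn : Int),
    get_best_fit_score fs l hbn = get_best_fit_score_alt fs l hbn := by
  intro l
  induction l with
  | nil => intro fs hbn; simp [get_best_fit_score, get_best_fit_score_alt, pvFindDelete]
  | cons p t ih =>
    intro fs hbn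
    obtain ⟨a, b⟩ := p
    by_cases hb : b = hbn
    · subst hb
      simp [get_best_fit_score, get_best_fit_score_alt, pvFindDelete]
    · by_cases hm : hbn ∈ t.map (fun elem => elem.2)
      · have ht : t ≠ [] := by intro h; subst h; simp at hm
        have hA := ih fs hbn
        have hne : (a, b) ≠ (((PySem.List.pyGet? (t.filter (fun elem => hbn == elem.2)) 0).getD (0,0)).1, hbn) := by
          intro h
          exact hb (congrArg Prod.snd h)
        simp only [get_best_fit_score, get_best_fit_score_alt] at hA ⊢
        rw [if_pos ⟨by simpa using List.length_pos_iff.mpr ht, hm⟩] at hA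
        rw [if_pos ⟨by simp, by simp [hm]⟩]
        simp only [List.filter_cons, show (hbn == b) = false by simp [Ne.symm hb],
          Bool.false_eq_true, if_false]
        rw [PySem.List.remove?_cons_of_ne t hne]
        simp only [pvFindDelete, show (b == hbn) = false by simp [hb], Bool.false_eq_true,
          if_false]
        cases hgo : pvFindDelete hbn t with
        | none => exact absurd hm ((pvFind_none_iff t hbn).mp hgo)
        | some v =>
          obtain ⟨f, r⟩ := v
          rw [hgo] at hA
          simp only at hA
          have h1 : ((PySem.List.pyGet? (t.filter (fun elem => hbn == elem.2)) 0).getD (0,0)).1 = f := congrArg Prod.fst hA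
          have h2 : (PySem.List.remove? t (((PySem.List.pyGet? (t.filter (fun elem => hbn == elem.2)) 0).getD (0,0)).1, hbn)).getD t = r := congrArg Prod.snd hA
          rw [h1] at h2 ⊢
          have hmem : (f, hbn) ∈ t := pvFind_some_mem t hbn f r hgo
          obtain ⟨r', hr'⟩ : ∃ r', PySem.List.remove? t (f, hbn) = some r' := by
            cases h : PySem.List.remove? t (f, hbn) with
            | none => exact absurd ((PySem.List.remove?_eq_none_iff t _).mp h) (by simp [hmem])
            | some x => exact ⟨x, rfl⟩
          rw [hr'] at h2 ⊢
          simp at h2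
          simp [h2]
      · simp only [get_best_fit_score, get_best_fit_score_alt]
        rw [if_neg (by
          rintro ⟨-, hmem⟩
          simp only [List.map_cons, List.mem_cons] at hmem
          rcases hmem with h | h
          · exact hb h.symm
          · exact hm h)]
        simp only [pvFindDelete, show (b == hbn) = false by simp [hb], Bool.false_eq_true,
          if_false]
        rw [(pvFind_none_iff t hbn).mpr hm]

-- ===== VERDICT (by name: the statement is the Claim_ definition above) =====
theorem get_best_fit_score_spec : Claim_equal_get_best_fit_score := by
  intro fs l hbn _
  unfold Spec_get_best_fit_score
  exact pv_main l fs hbn
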